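-- pv_equiv track=rewrite | github.com/xdlikr/rna-prophet | src/features/structure.py | _count_loops
-- ===== SOURCE A (Python) =====
-- def _count_loops(structure: str) -> int:
--     """Count all loop regions."""
--     loops = 0
--     in_loop = False
--
--     for char in structure:
--         if char == '.' and not in_loop:
--             loops += 1
--             in_loop = True
--         elif char in '()' and in_loop:
--             in_loop = False
--
--     return loops
-- ===== SOURCE B (Python) =====
-- import re
--
-- def _count_loops(structure: str) -> int:
--     """Count all loop regions: split on brackets, count segments containing a dot."""
--     return sum('.' in seg for seg in re.split(r'[()]', structure))
-- ===== Notes on version B (the rewrite author's own statement) =====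
-- stated objective: simpler
-- what changed: Replaces the explicit state-machine loop (loops counter + in_loop flag) with a one-liner: split the string on bracket characters via re.split and count the segments that contain a dot.
import Mathlib
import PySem

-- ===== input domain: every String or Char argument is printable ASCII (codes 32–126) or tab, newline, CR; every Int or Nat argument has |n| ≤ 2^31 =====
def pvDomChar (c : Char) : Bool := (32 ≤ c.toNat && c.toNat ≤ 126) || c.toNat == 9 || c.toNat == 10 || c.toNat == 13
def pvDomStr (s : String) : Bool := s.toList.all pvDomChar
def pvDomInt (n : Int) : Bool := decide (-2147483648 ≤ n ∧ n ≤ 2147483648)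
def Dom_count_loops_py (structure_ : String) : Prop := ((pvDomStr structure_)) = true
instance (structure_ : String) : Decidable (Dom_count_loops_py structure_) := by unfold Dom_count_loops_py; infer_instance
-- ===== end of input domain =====

-- B replaces A's state-machine loop by split-on-brackets + count segments containing a dot (simpler decomposition).

-- ===== PORT A =====
-- step of A's for-loop over (loops, in_loop)
def pvStepA (st : Int × Bool) (c : Char) : Int × Bool :=
  if c = '.' ∧ st.2 = false then (st.1 + 1, true)
  else if (c = '(' ∨ c = ')') ∧ st.2 = true then (st.1, false)
  else st

def count_loops_py (structure_ : String) : Int :=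
  (structure_.toList.foldl pvStepA (0, false)).1

-- ===== PORT B =====
-- re.split(r'[()]', s): maximal segments between bracket characters (hand recursion, exact)
def pvSplitBr : List Char → List (List Char)
  | [] => [[]]
  | c :: t =>
    if c = '(' ∨ c = ')' then [] :: pvSplitBr t
    else
      match pvSplitBr t with
      | [] => [[c]]   -- unreachable: pvSplitBr never returns []
      | s :: rest => (c :: s) :: rest

def count_loops_py_alt (structure_ : String) : Int :=
  ((pvSplitBr structure_.toList).countP (fun seg => seg.contains '.') : Int)

-- ===== PRECONDITION & SPEC =====
def Spec_count_loops_py (structure_ : String) (out : Int) : Prop := out = count_loops_py_alt structure_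
instance (structure_ : String) (out : Int) : Decidable (Spec_count_loops_py structure_ out) := by unfold Spec_count_loops_py; infer_instance

-- ===== CLAIM (what is proved, stated in full; the proofs are below) =====
def Claim_equal_count_loops_py : Prop := ∀ (structure_ : String), Dom_count_loops_py structure_ → Spec_count_loops_py structure_ (count_loops_py structure_)

-- ===== LEMMAS AND PROOFS =====

theorem pvSplitBr_ne_nil (l : List Char) : pvSplitBr l ≠ [] := by
  cases l with
  | nil => simp [pvSplitBr]
  | cons c t =>
    simp only [pvSplitBr]
    split
    · simp
    · cases h : pvSplitBr t <;> simp

-- loop invariant: A's fold from (loops, fl) adds the dot-segment count of the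
-- split, skipping the first segment when fl = true (its run is already counted)
theorem pvMain (l : List Char) (loops : Int) (fl : Bool) :
    (l.foldl pvStepA (loops, fl)).1 =
      loops + (((if fl then (pvSplitBr l).tail else pvSplitBr l).countP
                  (fun seg => seg.contains '.') : Nat) : Int) := by
  induction l generalizing loops fl with
  | nil => cases fl <;> simp [pvSplitBr]
  | cons c t ih =>
    obtain ⟨s, rest, hs⟩ : ∃ s rest, pvSplitBr t = s :: rest := by
      cases h : pvSplitBr t with
      | nil => exact absurd h (pvSplitBr_ne_nil t)
      | cons s rest => exact ⟨s, rest, rfl⟩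
    by_cases hbr : c = '(' ∨ c = ')'
    · -- bracket: A resets in_loop; B starts a new (empty) segment
      have hdot : ¬ c = '.' := by rcases hbr with h | h <;> simp [h]
      cases fl <;>
        simp [List.foldl_cons, pvStepA, hbr, hdot, pvSplitBr, hs] <;>
        simp [ih loops false, hs]
    · by_cases hdot : c = '.'
      · -- dot: extends current segment; counted only if run not already open
        subst hdot
        cases fl with
        | false =>
          have h1 : pvStepA (loops, false) '.' = (loops + 1, true) := by simp [pvStepA]
          rw [List.foldl_cons, h1, ih (loops + 1) true]
          simp [pvSplitBr, hs]
          omega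
        | true =>
          have h1 : pvStepA (loops, true) '.' = (loops, true) := by simp [pvStepA]
          rw [List.foldl_cons, h1, ih loops true]
          simp [pvSplitBr, hs]
      · -- other char: state unchanged; segment head gains a non-dot char
        have hne : ¬ ('.' = c) := fun h => hdot h.symm
        cases fl with
        | false =>
          have h1 : pvStepA (loops, false) c = (loops, false) := by simp [pvStepA, hdot]
          rw [List.foldl_cons, h1, ih loops false]
          simp [pvSplitBr, hbr, hs, List.countP_cons, hne]
        | true =>
          have h1 : pvStepA (loops, true) c = (loops, true) := by simp [pvStepA, hdot, hbr]
          rw [List.foldl_cons, h1, ih loops true]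
          simp [pvSplitBr, hbr, hs]

-- ===== VERDICT (by name: the statement is the Claim_ definition above) =====
theorem count_loops_py_spec : Claim_equal_count_loops_py := by
  intro s _
  show count_loops_py s = count_loops_py_alt s
  unfold count_loops_py count_loops_py_alt
  rw [pvMain s.toList 0 false]
  simp
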